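-- pv_equiv track=rewrite | github.com/su-ndey/CGV-BCT | Aayush joshi/(/(HCE081BCT001)/LAB 3/Q3_.py | bresenham_count_ops
-- ===== SOURCE A (Python) =====
-- def bresenham_count_ops(x0, y0, x1, y1):
--     additions = multiplications = 0
--     dx, dy = abs(x1-x0), abs(y1-y0)
--     sx, sy = (1 if x0<x1 else -1), (1 if y0<y1 else -1)
--     err = dx - dy
--     x, y = x0, y0
--     while True:
--         if x == x1 and y == y1:
--             break
--         e2 = 2*err
--         multiplications += 1
--         additions += 1
--         if e2 > -dy:
--             err -= dy
--             x += sx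
--             additions += 2
--         if e2 < dx:
--             err += dx
--             y += sy
--             additions += 2
--     return additions, multiplications
-- ===== SOURCE B (Python) =====
-- def bresenham_count_ops(x0, y0, x1, y1):
--     # Closed form: the loop runs max(dx, dy) iterations (1 add + 1 mult each),
--     # the x-branch fires exactly dx times and the y-branch exactly dy times (2 adds each).
--     dx, dy = abs(x1 - x0), abs(y1 - y0)
--     steps = max(dx, dy)
--     return steps + 2 * dx + 2 * dy, steps
-- ===== Notes on version B (the rewrite author's own statement) =====
-- stated objective: faster
-- what changed: Replaces the step-by-step Bresenham simulation loop with a closed form: the loop runs max(dx,dy) iterations, the x-branch fires dx times and the y-branch dy times, so the counts are (max(dx,dy)+2dx+2dy, max(dx,dy)).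
import Mathlib
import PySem

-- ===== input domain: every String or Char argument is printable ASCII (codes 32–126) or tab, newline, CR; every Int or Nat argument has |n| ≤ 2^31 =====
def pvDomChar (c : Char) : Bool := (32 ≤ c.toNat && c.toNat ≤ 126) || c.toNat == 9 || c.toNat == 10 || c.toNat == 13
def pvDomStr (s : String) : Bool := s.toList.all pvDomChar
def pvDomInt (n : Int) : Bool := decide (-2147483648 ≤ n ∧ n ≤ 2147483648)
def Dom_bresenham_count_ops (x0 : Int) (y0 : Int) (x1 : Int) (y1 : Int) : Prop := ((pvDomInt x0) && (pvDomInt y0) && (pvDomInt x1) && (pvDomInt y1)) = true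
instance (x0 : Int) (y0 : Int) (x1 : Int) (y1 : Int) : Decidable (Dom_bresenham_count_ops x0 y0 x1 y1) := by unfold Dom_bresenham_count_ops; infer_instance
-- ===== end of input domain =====

-- B replaces A's per-pixel Bresenham simulation loop by the closed form
-- (max(dx,dy)+2dx+2dy, max(dx,dy)): same return value, computed without the loop.

-- ===== PORT A =====
-- The Python 'while True' loop, transliterated with a fuel parameter; the fuel
-- (dx+dy).toNat passed below is proved sufficient (the loop exits after max(dx,dy)
-- iterations), so the fuel-exhaustion branch is never taken on any input.
def bresLoopA (x1 y1 dx dy sx sy : Int) : Nat → Int → Int → Int → Int → Int → List Int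
  | 0, _, _, _, add, mult => [add, mult]
  | fuel+1, x, y, err, add, mult =>
    if x = x1 ∧ y = y1 then [add, mult]
    else
      let e2 := 2 * err
      let mult1 := mult + 1
      let add1 := add + 1
      let err1 := if e2 > -dy then err - dy else err
      let x' := if e2 > -dy then x + sx else x
      let add2 := if e2 > -dy then add1 + 2 else add1
      let err2 := if e2 < dx then err1 + dx else err1
      let y' := if e2 < dx then y + sy else y
      let add3 := if e2 < dx then add2 + 2 else add2
      bresLoopA x1 y1 dx dy sx sy fuel x' y' err2 add3 mult1

def bresenham_count_ops (x0 : Int) (y0 : Int) (x1 : Int) (y1 : Int) : List Int :=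
  let dx := |x1 - x0|
  let dy := |y1 - y0|
  let sx : Int := if x0 < x1 then 1 else -1
  let sy : Int := if y0 < y1 then 1 else -1
  let err := dx - dy
  bresLoopA x1 y1 dx dy sx sy (dx + dy).toNat x0 y0 err 0 0

-- ===== PORT B =====
def bresenham_count_ops_alt (x0 : Int) (y0 : Int) (x1 : Int) (y1 : Int) : List Int :=
  let dx := |x1 - x0|
  let dy := |y1 - y0|
  let steps := max dx dy
  [steps + 2 * dx + 2 * dy, steps]

-- ===== PRECONDITION & SPEC =====
def Spec_bresenham_count_ops (x0 : Int) (y0 : Int) (x1 : Int) (y1 : Int) (out : List Int) : Prop := out = bresenham_count_ops_alt x0 y0 x1 y1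
instance (x0 : Int) (y0 : Int) (x1 : Int) (y1 : Int) (out : List Int) : Decidable (Spec_bresenham_count_ops x0 y0 x1 y1 out) := by unfold Spec_bresenham_count_ops; infer_instance

-- ===== CLAIM (what is proved, stated in full; the proofs are below) =====
def Claim_equal_bresenham_count_ops : Prop := ∀ (x0 : Int) (y0 : Int) (x1 : Int) (y1 : Int), Dom_bresenham_count_ops x0 y0 x1 y1 → Spec_bresenham_count_ops x0 y0 x1 y1 (bresenham_count_ops x0 y0 x1 y1)

-- ===== LEMMAS AND PROOFS =====

-- If only the x-branch fires (the step condition e2 ≥ dx together with the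
-- reachable-state invariant |2(j·dx - i·dy)| ≤ max dx dy), the remaining
-- x-distance strictly exceeds the remaining y-distance.
lemma onlyx_gt (dx dy i j : Int) (hdx : 0 ≤ dx) (hdy : 0 ≤ dy)
    (hi0 : 0 ≤ i) (hi : i + 1 ≤ dx) (hj0 : 0 ≤ j) (hj : j ≤ dy)
    (hinvL : -(max dx dy) ≤ 2 * (j * dx - i * dy))
    (hinvU : 2 * (j * dx - i * dy) ≤ max dx dy)
    (hnc2 : dx ≤ 2 * ((j + 1) * dx - (i + 1) * dy)) :
    dy - j < dx - i := by
  rcases le_total dy dx with h | h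
  · rw [max_eq_left h] at hinvL hinvU
    by_contra hab
    have hab' : dx - i ≤ dy - j := not_lt.mp hab
    have hba : dy - j ≤ dx - i := by
      nlinarith [mul_nonneg (by omega : (0:Int) ≤ dx - i) (by omega : (0:Int) ≤ dx - dy)]
    have heq : dy - j = dx - i := le_antisymm hba hab'
    nlinarith [mul_nonneg (by omega : (0:Int) ≤ dx - i - 1) (by omega : (0:Int) ≤ dx - dy)]
  · rw [max_eq_right h] at hinvL hinvU
    have hdd : dy ≤ dx := by nlinarith
    have heq : dx = dy := le_antisymm h hdd
    subst heq
    by_contra hab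
    have hab' : dx - i ≤ dx - j := not_lt.mp hab
    nlinarith [mul_nonneg (by omega : (0:Int) ≤ i - j) (by omega : (0:Int) ≤ dx)]

-- Loop invariant: from any reachable state (x = x0+sx·i, y = y0+sy·j,
-- err = (j+1)dx-(i+1)dy, with |2(j·dx - i·dy)| ≤ max dx dy), the loop returns the
-- closed-form counts, provided fuel covers the remaining taxicab distance.
lemma bresLoopA_inv (x0 y0 sx sy dx dy : Int)
    (hsx : sx = 1 ∨ sx = -1) (hsy : sy = 1 ∨ sy = -1)
    (hdx : 0 ≤ dx) (hdy : 0 ≤ dy) :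
    ∀ (fuel : Nat) (i j add mult : Int), 0 ≤ i → i ≤ dx → 0 ≤ j → j ≤ dy →
    -(max dx dy) ≤ 2 * (j * dx - i * dy) → 2 * (j * dx - i * dy) ≤ max dx dy →
    ((dx - i) + (dy - j)).toNat ≤ fuel →
    bresLoopA (x0 + sx * dx) (y0 + sy * dy) dx dy sx sy fuel
        (x0 + sx * i) (y0 + sy * j) ((j + 1) * dx - (i + 1) * dy) add mult
      = [add + (max (dx - i) (dy - j) + 2 * (dx - i) + 2 * (dy - j)),
         mult + max (dx - i) (dy - j)] := by
  intro fuel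
  induction fuel with
  | zero =>
    intro i j add mult hi0 hi hj0 hj _ _ hfuel
    have hij : i = dx ∧ j = dy := by omega
    simp [bresLoopA, hij.1, hij.2]
  | succ fuel IH =>
    intro i j add mult hi0 hi hj0 hj hinvL hinvU hfuel
    have hxeq : (x0 + sx * i = x0 + sx * dx) ↔ i = dx := by
      rcases hsx with h | h <;> subst h <;> omega
    have hyeq : (y0 + sy * j = y0 + sy * dy) ↔ j = dy := by
      rcases hsy with h | h <;> subst h <;> omega
    by_cases hdone : i = dx ∧ j = dy
    · rw [bresLoopA, if_pos (by rw [hxeq, hyeq]; exact hdone)]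
      rw [hdone.1, hdone.2]; simp
    · rw [bresLoopA, if_neg (by rw [hxeq, hyeq]; exact hdone)]
      dsimp only
      by_cases hc1 : 2 * ((j + 1) * dx - (i + 1) * dy) > -dy
      · by_cases hc2 : 2 * ((j + 1) * dx - (i + 1) * dy) < dx
        · -- both branches fire
          have hilt : i + 1 ≤ dx := by
            by_contra hix
            have hieq : i = dx := by omega
            subst hieq
            have hjlt : j + 1 ≤ dy := by omega
            nlinarith [mul_nonneg (by omega : (0:Int) ≤ dy - 1 - j) hdx]
          have hjlt : j + 1 ≤ dy := by
            by_contra hjx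
            have hjeq : j = dy := by omega
            subst hjeq
            nlinarith [mul_nonneg (by omega : (0:Int) ≤ dx - 1 - i) hdy]
          rw [if_pos hc1, if_pos hc1, if_pos hc1, if_pos hc2, if_pos hc2, if_pos hc2]
          have e1 : x0 + sx * i + sx = x0 + sx * (i + 1) := by ring
          have e2 : y0 + sy * j + sy = y0 + sy * (j + 1) := by ring
          have e3 : (j + 1) * dx - (i + 1) * dy - dy + dx = (j + 1 + 1) * dx - (i + 1 + 1) * dy := by ring
          rw [e1, e2, e3]
          rw [IH (i+1) (j+1) (add + 1 + 2 + 2) (mult + 1) (by omega) hilt (by omega) hjlt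
            (by nlinarith [le_max_right dx dy])
            (by nlinarith [le_max_left dx dy])
            (by omega)]
          simp only [List.cons.injEq, and_true]
          exact ⟨by omega, by omega⟩
        · -- only the x-branch fires
          have hilt : i + 1 ≤ dx := by
            by_contra hix
            have hieq : i = dx := by omega
            subst hieq
            have hjlt : j + 1 ≤ dy := by omega
            nlinarith [mul_nonneg (by omega : (0:Int) ≤ dy - 1 - j) hdx]
          have hnc2 : dx ≤ 2 * ((j + 1) * dx - (i + 1) * dy) := by omega
          have hgt : dy - j < dx - i := onlyx_gt dx dy i j hdx hdy hi0 hilt hj0 hj hinvL hinvU hnc2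
          rw [if_pos hc1, if_pos hc1, if_pos hc1, if_neg hc2, if_neg hc2, if_neg hc2]
          have e1 : x0 + sx * i + sx = x0 + sx * (i + 1) := by ring
          have e3 : (j + 1) * dx - (i + 1) * dy - dy = (j + 1) * dx - (i + 1 + 1) * dy := by ring
          rw [e1, e3]
          rw [IH (i+1) j (add + 1 + 2) (mult + 1) (by omega) hilt hj0 hj
            (by nlinarith [le_max_left dx dy])
            (by nlinarith [le_max_right dx dy])
            (by omega)]
          simp only [List.cons.injEq, and_true]
          exact ⟨by omega, by omega⟩
      · by_cases hc2 : 2 * ((j + 1) * dx - (i + 1) * dy) < dx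
        · -- only the y-branch fires
          have hjlt : j + 1 ≤ dy := by
            by_contra hjx
            have hjeq : j = dy := by omega
            subst hjeq
            nlinarith [mul_nonneg (by omega : (0:Int) ≤ dx - 1 - i) hdy]
          have hnc1 : 2 * ((j + 1) * dx - (i + 1) * dy) ≤ -dy := by omega
          have hgt : dx - i < dy - j := by
            have := onlyx_gt dy dx j i hdy hdx hj0 hjlt hi0 hi
              (by rw [max_comm]; nlinarith) (by rw [max_comm]; nlinarith)
              (by nlinarith)
            omega
          rw [if_neg hc1, if_neg hc1, if_neg hc1, if_pos hc2, if_pos hc2, if_pos hc2]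
          have e2 : y0 + sy * j + sy = y0 + sy * (j + 1) := by ring
          have e3 : (j + 1) * dx - (i + 1) * dy + dx = (j + 1 + 1) * dx - (i + 1) * dy := by ring
          rw [e2, e3]
          rw [IH i (j+1) (add + 1 + 2) (mult + 1) hi0 hi (by omega) hjlt
            (by nlinarith [le_max_left dx dy])
            (by nlinarith [le_max_right dx dy])
            (by omega)]
          simp only [List.cons.injEq, and_true]
          exact ⟨by omega, by omega⟩
        · -- neither branch firing is impossible away from the endpoint
          exfalso
          have h1 : 2 * ((j + 1) * dx - (i + 1) * dy) ≤ -dy := by omega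
          have h2 : dx ≤ 2 * ((j + 1) * dx - (i + 1) * dy) := by omega
          have h3 : dx + dy ≤ 0 := by omega
          have hdx0 : dx = 0 := by omega
          have hdy0 : dy = 0 := by omega
          exact hdone ⟨by omega, by omega⟩

-- Instantiating the invariant at the start state gives the closed form.
lemma main_case (x0 y0 x1 y1 sx sy dx dy : Int)
    (hsx : sx = 1 ∨ sx = -1) (hsy : sy = 1 ∨ sy = -1)
    (hdx : 0 ≤ dx) (hdy : 0 ≤ dy)
    (hx1 : x1 = x0 + sx * dx) (hy1 : y1 = y0 + sy * dy) :
    bresLoopA x1 y1 dx dy sx sy (dx + dy).toNat x0 y0 (dx - dy) 0 0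
      = [max dx dy + 2 * dx + 2 * dy, max dx dy] := by
  subst hx1 hy1
  have key := bresLoopA_inv x0 y0 sx sy dx dy hsx hsy hdx hdy
    (dx + dy).toNat 0 0 0 0 (le_refl 0) hdx (le_refl 0) hdy
    (by omega) (by omega) (by omega)
  simp only [zero_add, one_mul, mul_zero, add_zero, sub_zero] at key
  exact key

-- ===== VERDICT (by name: the statement is the Claim_ definition above) =====
theorem bresenham_count_ops_spec : Claim_equal_bresenham_count_ops := by
  intro x0 y0 x1 y1 _
  unfold Spec_bresenham_count_ops bresenham_count_ops bresenham_count_ops_alt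
  dsimp only
  by_cases hx : x0 < x1 <;> by_cases hy : y0 < y1
  · rw [if_pos hx, if_pos hy, abs_of_pos (by omega : (0:Int) < x1 - x0),
      abs_of_pos (by omega : (0:Int) < y1 - y0)]
    exact main_case x0 y0 x1 y1 1 1 (x1 - x0) (y1 - y0) (Or.inl rfl) (Or.inl rfl)
      (by omega) (by omega) (by ring) (by ring)
  · rw [if_pos hx, if_neg hy, abs_of_pos (by omega : (0:Int) < x1 - x0),
      abs_of_nonpos (by omega : y1 - y0 ≤ (0:Int)), neg_sub]
    exact main_case x0 y0 x1 y1 1 (-1) (x1 - x0) (y0 - y1) (Or.inl rfl) (Or.inr rfl)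
      (by omega) (by omega) (by ring) (by ring)
  · rw [if_neg hx, if_pos hy, abs_of_nonpos (by omega : x1 - x0 ≤ (0:Int)), neg_sub,
      abs_of_pos (by omega : (0:Int) < y1 - y0)]
    exact main_case x0 y0 x1 y1 (-1) 1 (x0 - x1) (y1 - y0) (Or.inr rfl) (Or.inl rfl)
      (by omega) (by omega) (by ring) (by ring)
  · rw [if_neg hx, if_neg hy, abs_of_nonpos (by omega : x1 - x0 ≤ (0:Int)), neg_sub,
      abs_of_nonpos (by omega : y1 - y0 ≤ (0:Int)), neg_sub]
    exact main_case x0 y0 x1 y1 (-1) (-1) (x0 - x1) (y0 - y1) (Or.inr rfl) (Or.inr rfl)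
      (by omega) (by omega) (by ring) (by ring)
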